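-- pv_equiv track=rewrite | github.com/liz8271/ML | task4-1.py | max_prod_mod_3
-- ===== SOURCE A (Python) =====
-- from typing import List
--
-- def max_prod_mod_3(x: List[int]) -> int:
--     a=[x[i]*x[i+1] for i in range(len(x)-1)]
--     i=0
--     while i<len(a):
--         if a[i]%3!=0:
--             del a[i]
--             i-=1
--         i+=1
--     if len(a)==0: return -1
--     return max(a)
-- ===== SOURCE B (Python) =====
-- def max_prod_mod_3(x):
--     best = None
--     for u, v in zip(x, x[1:]):
--         p = u * v
--         if p % 3 == 0 and (best is None or p > best):
--             best = p
--     return -1 if best is None else best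
-- ===== Notes on version B (the rewrite author's own statement) =====
-- stated objective: faster
-- what changed: A builds the full list of adjacent products, deletes non-multiples of 3 in place one by one (each del shifts the tail), then takes max; B is a single zip pass keeping a running maximum of products divisible by 3 with no intermediate list.
import Mathlib
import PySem

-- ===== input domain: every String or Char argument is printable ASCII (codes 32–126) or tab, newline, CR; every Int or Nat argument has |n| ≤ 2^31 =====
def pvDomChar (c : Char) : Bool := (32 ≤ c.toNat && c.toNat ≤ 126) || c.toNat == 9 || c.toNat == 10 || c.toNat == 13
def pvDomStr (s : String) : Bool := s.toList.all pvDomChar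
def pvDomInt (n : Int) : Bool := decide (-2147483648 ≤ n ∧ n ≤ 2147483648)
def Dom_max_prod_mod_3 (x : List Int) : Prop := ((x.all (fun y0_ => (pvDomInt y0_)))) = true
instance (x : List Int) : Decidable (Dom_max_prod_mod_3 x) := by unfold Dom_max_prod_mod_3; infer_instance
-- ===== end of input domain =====

-- B replaces A's build-list / in-place-deletion / max pipeline by one zip pass keeping a running
-- Option maximum over products divisible by 3 (objective: faster — single pass, no deletions).

-- ===== PORT A =====
-- A's while-loop with `del a[i]; i-=1; i+=1`: state (a, i); delete keeps i, otherwise i+1.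
def pvLoopA (a : List Int) (i : Nat) : List Int :=
  if h : i < a.length then
    if PySem.Int.mod a[i] 3 ≠ 0 then pvLoopA (a.eraseIdx i) i
    else pvLoopA a (i + 1)
  else a
termination_by a.length - i
decreasing_by
  · simp [List.length_eraseIdx, h]; omega
  · omega

def max_prod_mod_3 (x : List Int) : Int :=
  let a := (PySem.List.pyRange 0 ((x.length : Int) - 1) 1).map
    (fun i => PySem.List.pyGetD x i 0 * PySem.List.pyGetD x (i + 1) 0)
  let a := pvLoopA a 0
  if a.length = 0 then -1
  else (PySem.List.max? a (fun y => y)).getD 0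

-- ===== PORT B =====
def max_prod_mod_3_alt (x : List Int) : Int :=
  let best := (x.zip (PySem.List.slice x (some 1) none)).foldl
    (fun best uv =>
      let p := uv.1 * uv.2
      if PySem.Int.mod p 3 = 0 ∧ best.all (fun b => p > b) = true
      then some p else best)
    none
  match best with
  | none => -1
  | some b => b

-- ===== PRECONDITION & SPEC =====
def Spec_max_prod_mod_3 (x : List Int) (out : Int) : Prop := out = max_prod_mod_3_alt x
instance (x : List Int) (out : Int) : Decidable (Spec_max_prod_mod_3 x out) := by unfold Spec_max_prod_mod_3; infer_instance

-- ===== CLAIM (what is proved, stated in full; the proofs are below) =====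
def Claim_equal_max_prod_mod_3 : Prop := ∀ (x : List Int), Dom_max_prod_mod_3 x → Spec_max_prod_mod_3 x (max_prod_mod_3 x)

-- ===== LEMMAS AND PROOFS =====

-- A's deletion loop is a filter of the suffix from i (everything before i already passed).
theorem pvLoopA_eq (a : List Int) (i : Nat) :
    pvLoopA a i = a.take i ++ (a.drop i).filter (fun p => PySem.Int.mod p 3 = 0) := by
  induction a, i using pvLoopA.induct with
  | case1 a i h hne ih =>
    rw [pvLoopA]
    simp only [h, dif_pos]
    rw [if_pos hne, ih]
    rw [List.eraseIdx_eq_take_drop_succ]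
    have hdrop : a.drop i = a[i] :: a.drop (i + 1) := List.drop_eq_getElem_cons h
    rw [hdrop]
    have hne3 : ¬ (3 ∣ a[i]) := fun hd => hne ((PySem.Int.mod_eq_zero_iff_dvd _ _).2 hd)
    simp [List.length_take, Nat.le_of_lt h]
    rw [hdrop, List.filter_cons]
    simp [hne3]
  | case2 a i h hmod ih =>
    rw [pvLoopA]
    simp only [h, dif_pos]
    rw [if_neg (by simpa using hmod), ih]
    have hdrop : a.drop i = a[i] :: a.drop (i + 1) := List.drop_eq_getElem_cons h
    have htake : a.take (i + 1) = a.take i ++ [a[i]] := by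
      rw [List.take_add_one]; simp [List.getElem?_eq_getElem h]
    have h3 : (3 : Int) ∣ a[i] := (PySem.Int.mod_eq_zero_iff_dvd _ _).1 (by simpa using hmod)
    rw [htake, hdrop, List.filter_cons]
    simp only [decide_eq_true ((PySem.Int.mod_eq_zero_iff_dvd _ _).mpr h3), if_true]
    rw [List.append_assoc, List.singleton_append]
  | case3 a i h =>
    rw [pvLoopA]
    simp only [h]
    have : a.drop i = [] := List.drop_eq_nil_of_le (by omega)
    simp [this, List.take_of_length_le (by omega : a.length ≤ i)]

-- B's running-max fold from `some q` is the foldl max over the filtered list.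
theorem pvFold_some (ps : List Int) (q : Int) :
    ps.foldl (fun best p =>
      if PySem.Int.mod p 3 = 0 ∧ best.all (fun b => p > b) = true
      then some p else best) (some q)
    = some ((ps.filter (fun p => PySem.Int.mod p 3 = 0)).foldl max q) := by
  induction ps generalizing q with
  | nil => simp
  | cons p t ih =>
    simp only [List.foldl_cons, List.filter_cons]
    by_cases hP : PySem.Int.mod p 3 = 0
    · simp only [decide_eq_true hP, if_true]
      by_cases hlt : q < p
      · rw [if_pos ⟨hP, by simp [hlt]⟩, ih]
        simp only [List.foldl_cons]
        rw [max_eq_right hlt.le]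
      · rw [if_neg (by simp [hlt]), ih]
        simp only [List.foldl_cons]
        rw [max_eq_left (by omega : p ≤ q)]
    · simp only [decide_eq_false hP, Bool.false_eq_true, if_false]
      rw [if_neg (fun hc => hP hc.1), ih]

-- starting from `None` it yields the max of the filtered list, or `None` if it is empty.
theorem pvFold_none (ps : List Int) :
    ps.foldl (fun best p =>
      if PySem.Int.mod p 3 = 0 ∧ best.all (fun b => p > b) = true
      then some p else best) none
    = match ps.filter (fun p => PySem.Int.mod p 3 = 0) with
      | [] => none
      | h :: t => some (t.foldl max h) := by
  induction ps with
  | nil => simp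
  | cons p t ih =>
    simp only [List.foldl_cons, List.filter_cons]
    by_cases hP : PySem.Int.mod p 3 = 0
    · simp only [decide_eq_true hP, if_true]
      rw [if_pos ⟨hP, by simp⟩, pvFold_some]
    · simp only [decide_eq_false hP, Bool.false_eq_true, if_false]
      rw [if_neg (fun hc => hP hc.1), ih]

-- A's index comprehension equals the zip-of-adjacent-pairs product list.
theorem pvProds_eq (x : List Int) :
    (PySem.List.pyRange 0 ((x.length : Int) - 1) 1).map
      (fun i => PySem.List.pyGetD x i 0 * PySem.List.pyGetD x (i + 1) 0)
    = (x.zip x.tail).map (fun uv => uv.1 * uv.2) := by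
  rw [PySem.List.pyRange_one, List.map_map]
  apply List.ext_getElem
  · simp [List.length_zip, List.length_tail]
  · intro k h1 h2
    have hk : k < x.length - 1 := by simpa using h1
    have hk1 : k + 1 < x.length := by omega
    simp only [List.getElem_map, Function.comp, List.getElem_range, List.getElem_zip]
    have e2 : (0 : Int) + (k : Int) + 1 = (((k + 1 : Nat)) : Int) := by omega
    have e1 : (0 : Int) + (k : Int) = ((k : Nat) : Int) := by omega
    rw [e2, e1, PySem.List.pyGetD_natCast, PySem.List.pyGetD_natCast]
    simp [List.getD_eq_getElem?_getD, List.getElem?_eq_getElem (by omega : k < x.length),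
      List.getElem?_eq_getElem hk1, List.getElem_tail]

theorem pvB_eq (x : List Int) :
    max_prod_mod_3_alt x
    = match ((x.zip x.tail).map (fun uv => uv.1 * uv.2)).filter
        (fun p => PySem.Int.mod p 3 = 0) with
      | [] => -1
      | h :: t => t.foldl max h := by
  have h1 := pvFold_none ((x.zip x.tail).map (fun uv => uv.1 * uv.2))
  rw [List.foldl_map] at h1
  unfold max_prod_mod_3_alt
  rw [PySem.List.slice_from_one, h1]
  cases ((x.zip x.tail).map (fun uv => uv.1 * uv.2)).filter
      (fun p => PySem.Int.mod p 3 = 0) <;> rfl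

theorem pvA_eq (x : List Int) :
    max_prod_mod_3 x
    = match ((x.zip x.tail).map (fun uv => uv.1 * uv.2)).filter
        (fun p => PySem.Int.mod p 3 = 0) with
      | [] => -1
      | h :: t => t.foldl max h := by
  unfold max_prod_mod_3
  simp only [pvProds_eq, pvLoopA_eq, List.take_zero, List.drop_zero, List.nil_append]
  cases hf : ((x.zip x.tail).map (fun uv => uv.1 * uv.2)).filter
      (fun p => PySem.Int.mod p 3 = 0) with
  | nil => simp
  | cons h t => simp [PySem.List.max?_id_cons]

-- ===== VERDICT (by name: the statement is the Claim_ definition above) =====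
theorem max_prod_mod_3_spec : Claim_equal_max_prod_mod_3 := by
  intro x _
  unfold Spec_max_prod_mod_3
  rw [pvA_eq, pvB_eq]
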